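-- pv_equiv track=rewrite | github.com/thomasdrouin/algo3 | tester_nlogn.py | make_start_day_possible_exam_map
-- ===== SOURCE A (Python) =====
-- def make_start_day_possible_exam_map(liste_sortie, liste_echeance):
--     map_of_echeance_number_tuples_by_start = {}
--     number_of_possible_start_days = len(liste_sortie)
--     for k in range(0, number_of_possible_start_days):
--         map_of_echeance_number_tuples_by_start[k] = []
--     for i in range(0, len(liste_sortie)):
--         map_of_echeance_number_tuples_by_start[liste_sortie[i]].append([liste_echeance[i], i])
--     for start_day, echeance_number_tuple_list in map_of_echeance_number_tuples_by_start.items():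
--         map_of_echeance_number_tuples_by_start[start_day] = sorted(echeance_number_tuple_list, key=lambda x: x[0])
--     return map_of_echeance_number_tuples_by_start
-- ===== SOURCE B (Python) =====
-- def make_start_day_possible_exam_map(liste_sortie, liste_echeance):
--     n = len(liste_sortie)
--     result = {k: [] for k in range(n)}
--     for s, e, i in sorted(((liste_sortie[i], liste_echeance[i], i) for i in range(n)),
--                           key=lambda t: (t[0], t[1])):
--         result[s].append([e, i])
--     return result
-- ===== Notes on version B (the rewrite author's own statement) =====
-- stated objective: alternative
-- what changed: Replaces A's per-bucket sorting pass (one sorted() call per key) by ONE stable global sort of the (start, echeance, index) triples under the composite key (start, echeance) followed by a single distribution pass; stability makes every bucket come out sorted by echeance exactly as in A.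
import Mathlib
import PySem

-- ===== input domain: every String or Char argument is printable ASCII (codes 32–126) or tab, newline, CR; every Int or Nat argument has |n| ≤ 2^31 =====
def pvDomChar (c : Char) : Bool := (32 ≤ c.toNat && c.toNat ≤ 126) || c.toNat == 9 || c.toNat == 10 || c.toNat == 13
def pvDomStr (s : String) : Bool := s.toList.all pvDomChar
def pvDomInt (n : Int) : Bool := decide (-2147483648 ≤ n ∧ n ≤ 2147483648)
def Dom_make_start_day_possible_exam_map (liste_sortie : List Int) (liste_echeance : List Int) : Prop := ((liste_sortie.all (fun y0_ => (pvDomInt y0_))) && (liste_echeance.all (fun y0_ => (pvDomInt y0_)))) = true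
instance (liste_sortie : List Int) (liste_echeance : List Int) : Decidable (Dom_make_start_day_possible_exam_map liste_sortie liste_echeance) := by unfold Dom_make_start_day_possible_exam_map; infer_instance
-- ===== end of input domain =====

-- B replaces A's per-bucket sorting pass by ONE stable global sort of the (start, echeance, index)
-- triples followed by a single distribution pass (objective: alternative; not measured faster).

-- ===== PORT A =====
def make_start_day_possible_exam_map (liste_sortie : List Int) (liste_echeance : List Int) : List (Int × List (List Int)) :=
  let n : Int := liste_sortie.length
  let d0 : PySem.Dict Int (List (List Int)) :=
    (PySem.List.pyRange 0 n 1).foldl (fun d k => d.insert k []) PySem.Dict.empty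
  -- Python: map[liste_sortie[i]].append([liste_echeance[i], i]); under Pre_ the key is always
  -- present and the index in range, so Dict.modify / pyGetD are exact here
  let d1 : PySem.Dict Int (List (List Int)) :=
    (PySem.List.pyRange 0 n 1).foldl
      (fun d i => d.modify (PySem.List.pyGetD liste_sortie i 0) []
        (fun v => v ++ [[PySem.List.pyGetD liste_echeance i 0, i]])) d0
  let d2 : PySem.Dict Int (List (List Int)) :=
    d1.items.foldl
      (fun d p => d.insert p.1 (PySem.List.sorted p.2 (fun x => PySem.List.pyGetD x 0 0) false)) d1
  d2.items

-- ===== PORT B =====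
-- dict comprehension with distinct fresh keys → Dict.ofList; the generator of (start, echeance, i)
-- triples → map over pyRange (pyGetD exact under Pre_); sorted with the tuple key → sorted2;
-- result[s].append([e, i]) → Dict.modify with the append, exact as the key is present under Pre_
def make_start_day_possible_exam_map_alt (liste_sortie : List Int) (liste_echeance : List Int) : List (Int × List (List Int)) :=
  let idx : List Int := PySem.List.pyRange 0 (liste_sortie.length : Int) 1
  let result : PySem.Dict Int (List (List Int)) := PySem.Dict.ofList (idx.map (fun k => (k, [])))
  let triples : List (Int × Int × Int) := idx.map (fun i =>
    (PySem.List.pyGetD liste_sortie i 0, PySem.List.pyGetD liste_echeance i 0, i))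
  ((PySem.List.sorted2 triples (fun t => t.1) (fun t => t.2.1) false).foldl
    (fun d t => match t with | (s, e, i) => d.modify s [] (· ++ [[e, i]])) result).items

-- ===== PRECONDITION & SPEC =====
-- Pre_ excludes exactly the inputs on which the Python A raises: a KeyError when some start day
-- is outside range(len(liste_sortie)), an IndexError when liste_echeance is shorter than liste_sortie.
def Pre_make_start_day_possible_exam_map (liste_sortie : List Int) (liste_echeance : List Int) : Prop :=
  (∀ x ∈ liste_sortie, 0 ≤ x ∧ x < (liste_sortie.length : Int)) ∧ liste_sortie.length ≤ liste_echeance.length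
instance (liste_sortie : List Int) (liste_echeance : List Int) : Decidable (Pre_make_start_day_possible_exam_map liste_sortie liste_echeance) := by unfold Pre_make_start_day_possible_exam_map; infer_instance

def pvWitness_make_start_day_possible_exam_map : List Int × List Int := ([0, 1, 0, 1, 0], [5, 3, 5, 1, 2])

def Spec_make_start_day_possible_exam_map (liste_sortie : List Int) (liste_echeance : List Int) (out : List (Int × List (List Int))) : Prop := out = make_start_day_possible_exam_map_alt liste_sortie liste_echeance
instance (liste_sortie : List Int) (liste_echeance : List Int) (out : List (Int × List (List Int))) : Decidable (Spec_make_start_day_possible_exam_map liste_sortie liste_echeance out) := by unfold Spec_make_start_day_possible_exam_map; infer_instance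

-- ===== CLAIM (what is proved, stated in full; the proofs are below) =====
def Claim_equal_make_start_day_possible_exam_map : Prop := ∀ (liste_sortie : List Int) (liste_echeance : List Int), Dom_make_start_day_possible_exam_map liste_sortie liste_echeance → Pre_make_start_day_possible_exam_map liste_sortie liste_echeance → Spec_make_start_day_possible_exam_map liste_sortie liste_echeance (make_start_day_possible_exam_map liste_sortie liste_echeance)

-- ===== LEMMAS AND PROOFS =====

theorem pv_insertBy_cons {α : Type} (before : α → α → Bool) (x y : α) (ys : List α) :
    PySem.List.insertBy before x (y :: ys) =
      if before x y then x :: y :: ys else y :: PySem.List.insertBy before x ys := rfl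

theorem pv_insertBy_cons_of_forall {α : Type} (before : α → α → Bool) (x : α) (ys : List α)
    (h : ∀ z ∈ ys, before x z = true) :
    PySem.List.insertBy before x ys = x :: ys := by
  cases ys with
  | nil => rfl
  | cons y t => rw [pv_insertBy_cons, if_pos (h y (by simp))]

theorem pv_filter_insertBy {α : Type} (before : α → α → Bool) (p : α → Bool) (x : α)
    (ys : List α)
    (hs : ys.Pairwise (fun a b => before b a = false))
    (ht : ∀ y z, before x y = true → before z y = false → before x z = true) :
    (PySem.List.insertBy before x ys).filter p =
      if p x then PySem.List.insertBy before x (ys.filter p) else ys.filter p := by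
  induction ys with
  | nil =>
    by_cases hpx : p x = true <;> simp [PySem.List.insertBy, hpx]
  | cons y t ih =>
    rw [List.pairwise_cons] at hs
    have ih' := ih hs.2
    have hforall : ¬ p y = true → before x y = true → ∀ z ∈ t.filter p, before x z = true := by
      intro _ hxy z hz
      exact ht y z hxy (hs.1 z (List.mem_of_mem_filter hz))
    rw [pv_insertBy_cons]
    by_cases hxy : before x y = true <;> by_cases hpy : p y = true <;>
      by_cases hpx : p x = true <;>
      simp [hxy, hpy, hpx, ih', pv_insertBy_cons] <;>
      rw [pv_insertBy_cons_of_forall before x (t.filter p) (hforall hpy hxy)]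

theorem pv_pairwise_insertBy {α : Type} (before : α → α → Bool) (x : α) (ys : List α)
    (hasym : ∀ a b, before a b = true → before b a = false)
    (htrans : ∀ a b c, before a b = true → before b c = true → before a c = true)
    (hs : ys.Pairwise (fun a b => before b a = false)) :
    (PySem.List.insertBy before x ys).Pairwise (fun a b => before b a = false) := by
  induction ys with
  | nil => simp [PySem.List.insertBy]
  | cons y t ih =>
    rw [List.pairwise_cons] at hs
    rw [pv_insertBy_cons]
    by_cases hxy : before x y = true
    · rw [if_pos hxy]
      refine List.pairwise_cons.2 ⟨?_, List.pairwise_cons.2 hs⟩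
      intro z hz
      rcases List.mem_cons.1 hz with rfl | hz'
      · exact hasym _ _ hxy
      · by_cases h : before z x = true
        · have := htrans z x y h hxy
          rw [hs.1 z hz'] at this; exact absurd this (by simp)
        · simpa using h
    · rw [if_neg hxy]
      refine List.pairwise_cons.2 ⟨?_, ih hs.2⟩
      intro z hz
      rcases (PySem.List.mem_insertBy before x z t).1 hz with rfl | hz'
      · simpa using hxy
      · exact hs.1 z hz'

theorem pv_filter_foldl_insertBy {α : Type} (before : α → α → Bool) (p : α → Bool)
    (hasym : ∀ a b, before a b = true → before b a = false)
    (htrans : ∀ a b c, before a b = true → before b c = true → before a c = true)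
    (ht : ∀ x y z, before x y = true → before z y = false → before x z = true)
    (xs : List α) : ∀ (acc : List α), acc.Pairwise (fun a b => before b a = false) →
    (xs.foldl (fun a x => PySem.List.insertBy before x a) acc).filter p =
      (xs.filter p).foldl (fun a x => PySem.List.insertBy before x a) (acc.filter p) := by
  induction xs with
  | nil => intro acc _; simp
  | cons x t ih =>
    intro acc hacc
    simp only [List.foldl_cons, List.filter_cons]
    rw [ih _ (pv_pairwise_insertBy before x acc hasym htrans hacc),
        pv_filter_insertBy before p x acc hacc (ht x)]
    by_cases hpx : p x = true
    · simp [hpx]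
    · simp [hpx]

theorem pv_map_insertBy {α β : Type} (before : α → α → Bool) (before' : β → β → Bool)
    (g : α → β) (h : ∀ a b, before' (g a) (g b) = before a b) (x : α) (ys : List α) :
    (PySem.List.insertBy before x ys).map g = PySem.List.insertBy before' (g x) (ys.map g) := by
  induction ys with
  | nil => rfl
  | cons y t ih =>
    rw [pv_insertBy_cons]
    simp only [List.map_cons, pv_insertBy_cons, h x y]
    split <;> simp_all

theorem pv_map_foldl_insertBy {α β : Type} (before : α → α → Bool) (before' : β → β → Bool)
    (g : α → β) (h : ∀ a b, before' (g a) (g b) = before a b) (xs : List α) :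
    ∀ (acc : List α),
    (xs.foldl (fun a x => PySem.List.insertBy before x a) acc).map g =
      (xs.map g).foldl (fun a x => PySem.List.insertBy before' x a) (acc.map g) := by
  induction xs with
  | nil => intro acc; rfl
  | cons x t ih =>
    intro acc
    simp only [List.foldl_cons, List.map_cons]
    rw [ih, pv_map_insertBy before before' g h]

theorem pv_insertBy_congr {α : Type} (before before' : α → α → Bool) (x : α) (ys : List α)
    (h : ∀ b ∈ ys, before x b = before' x b) :
    PySem.List.insertBy before x ys = PySem.List.insertBy before' x ys := by
  induction ys with
  | nil => rfl
  | cons y t ih =>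
    rw [pv_insertBy_cons, pv_insertBy_cons, h y (by simp)]
    split <;> [rfl; rw [ih (fun b hb => h b (by simp [hb]))]]

theorem pv_foldl_insertBy_congr {α : Type} (before before' : α → α → Bool)
    (xs : List α) : ∀ (acc : List α),
    (∀ a ∈ xs, ∀ b, (b ∈ xs ∨ b ∈ acc) → before a b = before' a b) →
    xs.foldl (fun a x => PySem.List.insertBy before x a) acc =
      xs.foldl (fun a x => PySem.List.insertBy before' x a) acc := by
  induction xs with
  | nil => intro acc _; rfl
  | cons x t ih =>
    intro acc h
    simp only [List.foldl_cons]
    rw [pv_insertBy_congr before before' x acc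
        (fun b hb => h x (by simp) b (Or.inr hb))]
    exact ih _ (fun a ha b hb => h a (by simp [ha]) b (by
      rcases hb with hb | hb
      · exact Or.inl (by simp [hb])
      · rcases (PySem.List.mem_insertBy before' x b acc).1 hb with rfl | hb'
        · exact Or.inl (by simp)
        · exact Or.inr hb'))

theorem pv_set_update_of_subset (s : List Int) (l : List Int) (h : ∀ x ∈ l, x ∈ s) :
    PySem.Set.update s l = s := by
  induction l generalizing s with
  | nil => rfl
  | cons x t ih =>
    have : PySem.Set.update s (x :: t) = PySem.Set.update (PySem.Set.add s x) t := rfl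
    rw [this, PySem.Set.add_of_mem (h x (by simp)), ih s (fun y hy => h y (by simp [hy]))]

theorem pv_map_if_eq_self {V : Type} (l : List (Int × V)) (k : Int) (v : V)
    (h : k ∉ l.map (·.1)) :
    l.map (fun q => if (q.1 == k) = true then (k, v) else q) = l := by
  conv_rhs => rw [← List.map_id l]
  apply List.map_congr_left
  intro q hq
  have hq1 : q.1 ∈ l.map (·.1) := List.mem_map_of_mem hq
  have : ¬ q.1 = k := fun hh => h (hh ▸ hq1)
  simp [this]

theorem pv_items_foldl_insert_over {V : Type} (f : V → V) :
    ∀ (l : List (Int × V)) (d : PySem.Dict Int V)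
      (pre : List (Int × V)),
      d.items = pre ++ l → (pre.map (·.1) ++ l.map (·.1)).Nodup →
      (l.foldl (fun d p => d.insert p.1 (f p.2)) d).items =
        pre ++ l.map (fun p => (p.1, f p.2)) := by
  intro l
  induction l with
  | nil => intro d pre hitems _; simpa using hitems
  | cons p t ih =>
    intro d pre hitems hnd
    have hkey : p.1 ∈ d.keys := by
      simp [PySem.Dict.keys, hitems]
    have hcont : d.contains p.1 = true := (PySem.Dict.contains_iff_mem_keys d p.1).2 hkey
    simp only [List.foldl_cons]
    have hnd' : ((pre.map (·.1)) ++ p.1 :: t.map (·.1)).Nodup := by simpa using hnd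
    rcases (List.nodup_append.1 hnd') with ⟨-, hnd2, hdisj⟩
    have hpre : p.1 ∉ pre.map (·.1) := by
      intro hmem
      exact (hdisj p.1 hmem p.1 (by simp)) rfl
    have hte : p.1 ∉ t.map (·.1) := (List.nodup_cons.1 hnd2).1
    have hins : (d.insert p.1 (f p.2)).items = (pre ++ [(p.1, f p.2)]) ++ t := by
      rw [PySem.Dict.items_insert_of_contains d (f p.2) hcont, hitems]
      simp only [List.map_append, List.map_cons]
      rw [pv_map_if_eq_self pre p.1 (f p.2) hpre, pv_map_if_eq_self t p.1 (f p.2) hte]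
      simp
    have := ih (d.insert p.1 (f p.2)) (pre ++ [(p.1, f p.2)]) hins (by
      simpa using hnd')
    rw [this]
    simp

-- abbreviations for the proof
def pvS (ls : List Int) (i : Int) : Int := PySem.List.pyGetD ls i 0
def pvE (le : List Int) (i : Int) : Int := PySem.List.pyGetD le i 0
def pvG (le : List Int) (i : Int) : List Int := [pvE le i, i]
def pvR (ls : List Int) : List Int := PySem.List.pyRange 0 (ls.length : Int) 1
def pvD0 (ls : List Int) : PySem.Dict Int (List (List Int)) :=
  (pvR ls).foldl (fun d k => d.insert k []) PySem.Dict.empty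

theorem pv_d0_items (ls : List Int) :
    (pvD0 ls).items = (pvR ls).map (fun k => (k, ([] : List (List Int)))) := by
  have := PySem.Dict.items_foldl_insert_fresh (pvR ls) (fun a => a)
    (fun _ => ([] : List (List Int))) PySem.Dict.empty
    (fun a _ => PySem.Dict.contains_empty a) (by simpa using PySem.List.nodup_pyRange_one 0 (ls.length : Int))
  simpa [pvD0] using this

theorem pv_d0_keys (ls : List Int) : (pvD0 ls).keys = pvR ls := by
  simp [PySem.Dict.keys, pv_d0_items, Function.comp_def]

theorem pv_append_fold (ls le : List Int) (xs : List Int) (d : PySem.Dict Int (List (List Int))) :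
    xs.foldl (fun d i => d.modify (PySem.List.pyGetD ls i 0) []
      (fun v => v ++ [[PySem.List.pyGetD le i 0, i]])) d
    = (xs.map (fun i => (pvS ls i, pvG le i))).foldl
        (fun d p => d.modify p.1 [] (fun v => v ++ [p.2])) d := by
  rw [List.foldl_map]; rfl

theorem pv_groupdict_items (ls le : List Int) (xs : List Int)
    (hmem : ∀ i ∈ xs, pvS ls i ∈ pvR ls) :
    (xs.foldl (fun d i => d.modify (PySem.List.pyGetD ls i 0) []
      (fun v => v ++ [[PySem.List.pyGetD le i 0, i]])) (pvD0 ls)).items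
    = (pvR ls).map (fun k => (k, (xs.filter (fun i => pvS ls i == k)).map (pvG le))) := by
  rw [pv_append_fold]
  set P : List (Int × List Int) := xs.map (fun i => (pvS ls i, pvG le i)) with hP
  set d1 := P.foldl (fun d p => d.modify p.1 [] (fun v => v ++ [p.2])) (pvD0 ls) with hd1
  have hkeys : d1.keys = pvR ls := by
    rw [hd1]
    have := PySem.Dict.keys_foldl_modify_key P (fun p => p.1) ([] : List (List Int))
      (fun _ p v => v ++ [p.2]) (pvD0 ls)
    rw [this, pv_d0_keys]
    apply pv_set_update_of_subset
    intro x hx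
    rcases List.mem_map.1 hx with ⟨p, hp, rfl⟩
    rcases List.mem_map.1 hp with ⟨i, hi, rfl⟩
    exact hmem i hi
  have hnodup : d1.keys.Nodup := by
    rw [hkeys]; simpa using PySem.List.nodup_pyRange_one 0 (ls.length : Int)
  have hnodup0 : (pvD0 ls).keys.Nodup := by
    rw [pv_d0_keys]; simpa using PySem.List.nodup_pyRange_one 0 (ls.length : Int)
  rw [PySem.Dict.items_eq_map_keys d1 hnodup ([] : List (List Int)), hkeys]
  apply List.map_congr_left
  intro k hk
  have hget : d1.getD k [] = (pvD0 ls).getD k [] ++ (P.filter (fun p => p.1 == k)).map (·.2) := by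
    rw [hd1]
    exact PySem.Dict.getD_foldl_modify_append P (pvD0 ls) k
  have hget0 : (pvD0 ls).getD k [] = [] := by
    apply PySem.Dict.getD_of_mem_items (pvD0 ls) _ hnodup0
    rw [pv_d0_items]
    exact List.mem_map.2 ⟨k, hk, rfl⟩
  have hfilter : (P.filter (fun p => p.1 == k)).map (·.2)
      = (xs.filter (fun i => pvS ls i == k)).map (pvG le) := by
    rw [hP, List.filter_map, List.map_map]
    rfl
  simp [hget, hget0, hfilter]

theorem pv_A_eq (ls le : List Int) (hmem : ∀ i ∈ pvR ls, pvS ls i ∈ pvR ls) :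
    make_start_day_possible_exam_map ls le
      = (pvR ls).map (fun k => (k, PySem.List.sorted
          (((pvR ls).filter (fun i => pvS ls i == k)).map (pvG le))
          (fun x => PySem.List.pyGetD x 0 0) false)) := by
  have hd1 := pv_groupdict_items ls le (pvR ls) hmem
  set d1 := ((pvR ls).foldl (fun d i => d.modify (PySem.List.pyGetD ls i 0) []
    (fun v => v ++ [[PySem.List.pyGetD le i 0, i]])) (pvD0 ls)) with hd1def
  have hA : make_start_day_possible_exam_map ls le
      = (d1.items.foldl (fun d p => d.insert p.1
          (PySem.List.sorted p.2 (fun x => PySem.List.pyGetD x 0 0) false)) d1).items := rfl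
  rw [hA]
  have hmap1 : d1.items.map (·.1) = pvR ls := by
    rw [hd1]; simp [Function.comp_def]
  have hnd : (([] : List (Int × List (List Int))).map (·.1) ++ d1.items.map (·.1)).Nodup := by
    simp only [List.map_nil, List.nil_append, hmap1]
    simpa using PySem.List.nodup_pyRange_one 0 (ls.length : Int)
  rw [pv_items_foldl_insert_over
      (fun v => PySem.List.sorted v (fun x => PySem.List.pyGetD x 0 0) false)
      d1.items d1 [] (by simp) hnd]
  rw [hd1]
  simp [List.map_map, Function.comp_def]

-- B's sorted triple list is the image, under i ↦ (s_i, e_i, i), of the index list sorted by the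
-- same composite key; hence B's fold is the index fold of pv_groupdict_items in sorted order.
theorem pv_B_unfold (ls le : List Int) :
    make_start_day_possible_exam_map_alt ls le
      = ((PySem.List.sorted2 (pvR ls) (fun i => PySem.List.pyGetD ls i 0)
            (fun i => PySem.List.pyGetD le i 0) false).foldl
          (fun d i => d.modify (PySem.List.pyGetD ls i 0) []
            (fun v => v ++ [[PySem.List.pyGetD le i 0, i]])) (pvD0 ls)).items := by
  have hmap : PySem.List.sorted2
      ((pvR ls).map (fun i => (pvS ls i, pvE le i, i)))
      (fun t => t.1) (fun t => t.2.1) false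
      = (PySem.List.sorted2 (pvR ls) (fun i => PySem.List.pyGetD ls i 0)
          (fun i => PySem.List.pyGetD le i 0) false).map
        (fun i => (pvS ls i, pvE le i, i)) := by
    have := pv_map_foldl_insertBy
      (fun a b => decide (pvS ls a < pvS ls b) ||
        (!decide (pvS ls b < pvS ls a) && decide (pvE le a < pvE le b)))
      (fun t u : Int × Int × Int => decide (t.1 < u.1) ||
        (!decide (u.1 < t.1) && decide (t.2.1 < u.2.1)))
      (fun i => (pvS ls i, pvE le i, i)) (fun a b => rfl) (pvR ls) []
    exact this.symm
  show ((PySem.List.sorted2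
      ((pvR ls).map (fun i => (pvS ls i, pvE le i, i)))
      (fun t => t.1) (fun t => t.2.1) false).foldl
      (fun d t => match t with | (s, e, i) => d.modify s [] (· ++ [[e, i]]))
      (PySem.Dict.ofList ((pvR ls).map (fun k => (k, []))))).items = _
  have hof : PySem.Dict.ofList ((pvR ls).map (fun k => (k, ([] : List (List Int)))))
      = pvD0 ls := by
    show ((pvR ls).map (fun k => (k, ([] : List (List Int))))).foldl
        (fun d p => d.insert p.1 p.2) PySem.Dict.empty = pvD0 ls
    rw [List.foldl_map]
    rfl
  rw [hmap, List.foldl_map, hof]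
  rfl

theorem pv_B_eq (ls le : List Int)
    (hmem : ∀ i ∈ pvR ls, pvS ls i ∈ pvR ls) :
    make_start_day_possible_exam_map_alt ls le
      = (pvR ls).map (fun k => (k,
          ((PySem.List.sorted2 (pvR ls) (fun i => PySem.List.pyGetD ls i 0)
            (fun i => PySem.List.pyGetD le i 0) false).filter
              (fun i => pvS ls i == k)).map (pvG le))) := by
  rw [pv_B_unfold]
  have hmemσ : ∀ i ∈ PySem.List.sorted2 (pvR ls) (fun i => PySem.List.pyGetD ls i 0)
      (fun i => PySem.List.pyGetD le i 0) false, pvS ls i ∈ pvR ls := by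
    intro i hi
    exact hmem i ((PySem.List.sorted2_perm _ _ _ _).mem_iff.1 hi)
  exact pv_groupdict_items ls le _ hmemσ

theorem pv_bucket_eq (ls le : List Int) (k : Int) :
    ((PySem.List.sorted2 (pvR ls) (fun i => PySem.List.pyGetD ls i 0)
        (fun i => PySem.List.pyGetD le i 0) false).filter
          (fun i => pvS ls i == k)).map (pvG le)
      = PySem.List.sorted (((pvR ls).filter (fun i => pvS ls i == k)).map (pvG le))
          (fun x => PySem.List.pyGetD x 0 0) false := by
  have hσ : PySem.List.sorted2 (pvR ls) (fun i => PySem.List.pyGetD ls i 0)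
      (fun i => PySem.List.pyGetD le i 0) false
      = (pvR ls).foldl (fun a x => PySem.List.insertBy
          (fun a b => decide (pvS ls a < pvS ls b) ||
            (!decide (pvS ls b < pvS ls a) && decide (pvE le a < pvE le b))) x a) [] := rfl
  have hasym : ∀ a b, (decide (pvS ls a < pvS ls b) ||
      (!decide (pvS ls b < pvS ls a) && decide (pvE le a < pvE le b))) = true →
      (decide (pvS ls b < pvS ls a) ||
      (!decide (pvS ls a < pvS ls b) && decide (pvE le b < pvE le a))) = false := by
    intro a b; simp; omega
  have htrans : ∀ a b c, (decide (pvS ls a < pvS ls b) ||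
      (!decide (pvS ls b < pvS ls a) && decide (pvE le a < pvE le b))) = true →
      (decide (pvS ls b < pvS ls c) ||
      (!decide (pvS ls c < pvS ls b) && decide (pvE le b < pvE le c))) = true →
      (decide (pvS ls a < pvS ls c) ||
      (!decide (pvS ls c < pvS ls a) && decide (pvE le a < pvE le c))) = true := by
    intro a b c; simp; omega
  have ht : ∀ x y z, (decide (pvS ls x < pvS ls y) ||
      (!decide (pvS ls y < pvS ls x) && decide (pvE le x < pvE le y))) = true →
      (decide (pvS ls z < pvS ls y) ||
      (!decide (pvS ls y < pvS ls z) && decide (pvE le z < pvE le y))) = false →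
      (decide (pvS ls x < pvS ls z) ||
      (!decide (pvS ls z < pvS ls x) && decide (pvE le x < pvE le z))) = true := by
    intro x y z; simp; omega
  rw [hσ, pv_filter_foldl_insertBy _ (fun i => pvS ls i == k) hasym htrans ht (pvR ls) []
      (List.Pairwise.nil)]
  rw [List.filter_nil]
  rw [pv_foldl_insertBy_congr _ (fun a b => decide (pvE le a < pvE le b))
      ((pvR ls).filter (fun i => pvS ls i == k)) [] ?hcong]
  case hcong =>
    intro a ha b hb
    rcases hb with hb | hb
    · have ha' : pvS ls a = k := by simpa using List.of_mem_filter ha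
      have hb' : pvS ls b = k := by simpa using List.of_mem_filter hb
      simp [ha', hb']
    · simp at hb
  rw [pv_map_foldl_insertBy (fun a b => decide (pvE le a < pvE le b))
      (fun u v => decide (PySem.List.pyGetD u 0 0 < PySem.List.pyGetD v 0 0))
      (pvG le) (fun a b => rfl) ((pvR ls).filter (fun i => pvS ls i == k)) []]
  rw [List.map_nil]
  exact (PySem.List.sorted_eq_foldl_insertBy _ _).symm

theorem pv_main (ls le : List Int)
    (hpre : ∀ x ∈ ls, 0 ≤ x ∧ x < (ls.length : Int)) :
    make_start_day_possible_exam_map ls le = make_start_day_possible_exam_map_alt ls le := by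
  have hmem : ∀ i ∈ pvR ls, pvS ls i ∈ pvR ls := by
    intro i hi
    rw [pvR] at hi
    rw [PySem.List.mem_pyRange_one] at hi
    have hlt : i < (ls.length : Int) := hi.2
    have hget : pvS ls i = ls[i.toNat]'(by omega) :=
      PySem.List.pyGetD_eq_getElem ls 0 hi.1 hlt
    have hmem' : ls[i.toNat]'(by omega) ∈ ls := List.getElem_mem _
    have := hpre _ (hget ▸ hmem')
    rw [pvR, PySem.List.mem_pyRange_one]
    exact this
  rw [pv_A_eq ls le hmem, pv_B_eq ls le hmem]
  apply List.map_congr_left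
  intro k _
  rw [pv_bucket_eq ls le k]

-- ===== VERDICT (by name: the statement is the Claim_ definition above) =====
theorem make_start_day_possible_exam_map_spec : Claim_equal_make_start_day_possible_exam_map := by
  intro ls le _hdom hpre
  unfold Spec_make_start_day_possible_exam_map
  exact pv_main ls le hpre.1
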